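-- pv_equiv track=rewrite | github.com/luckin-li/DiffusionDet | test.py | build_image_id_to_catids
-- ===== SOURCE A (Python) =====
-- from collections import defaultdict
--
-- def build_image_id_to_catids(annotations):
--     mapping = defaultdict(list)
--     for ann in annotations:
--         img_id = ann.get("image_id")
--         cat = ann.get("category_id")
--         if img_id is None or cat is None:
--             continue
--         mapping[img_id].append(cat)
--     # dedupe while preserving order
--     for k, v in mapping.items():
--         seen = set()
--         uniq = []
--         for x in v:
--             if x not in seen:
--                 uniq.append(x); seen.add(x)
--         mapping[k] = uniq
--     return mapping
-- ===== SOURCE B (Python) =====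
-- from collections import defaultdict
--
-- def build_image_id_to_catids(annotations):
--     # single streaming pass: dedupe while grouping instead of group-then-dedupe
--     result = defaultdict(list)
--     seen = defaultdict(set)
--     for ann in annotations:
--         img_id = ann.get("image_id")
--         cat = ann.get("category_id")
--         if img_id is None or cat is None:
--             continue
--         if cat not in seen[img_id]:
--             result[img_id].append(cat)
--             seen[img_id].add(cat)
--     return result
-- ===== Notes on version B (the rewrite author's own statement) =====
-- stated objective: alternative
-- what changed: A groups all category_ids per image_id first and then runs a second dedupe pass over every bucket; B is a single streaming pass that maintains per-image seen-sets and appends each category_id at most once, so the second phase and the intermediate duplicate-holding lists disappear.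
import Mathlib
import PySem

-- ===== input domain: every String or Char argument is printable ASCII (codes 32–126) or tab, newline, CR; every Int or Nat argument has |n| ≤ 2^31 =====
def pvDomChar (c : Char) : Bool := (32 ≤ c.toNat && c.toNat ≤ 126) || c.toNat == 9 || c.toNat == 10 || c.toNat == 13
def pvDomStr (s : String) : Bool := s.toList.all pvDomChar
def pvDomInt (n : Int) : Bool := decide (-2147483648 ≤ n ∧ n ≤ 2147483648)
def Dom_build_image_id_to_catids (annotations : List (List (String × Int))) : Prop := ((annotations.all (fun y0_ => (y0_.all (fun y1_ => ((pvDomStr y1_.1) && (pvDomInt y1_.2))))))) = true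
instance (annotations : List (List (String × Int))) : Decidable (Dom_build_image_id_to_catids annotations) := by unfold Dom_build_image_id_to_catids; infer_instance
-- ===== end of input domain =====

-- B folds A's group-then-dedupe two-phase construction into ONE streaming pass keeping per-image seen-sets;
-- return values agree (A mutates nothing observable). Proved equal on the whole domain.


-- ===== PORT A =====
-- ann.get("image_id") / ann.get("category_id") with the None-skip (shared by both ports: both Pythons have these identical lines)
def pvGetPair (ann : List (String × Int)) : Option (Int × Int) :=
  match (PySem.Dict.mk ann).get? "image_id", (PySem.Dict.mk ann).get? "category_id" with
  | some i, some c => some (i, c)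
  | _, _ => none

-- A's inner dedupe loop: seen set plus uniq accumulator
def pvDedupLoop (v : List Int) : List Int :=
  (v.foldl (fun (st : PySem.Set Int × List Int) x =>
      if st.1.contains x then st else (PySem.Set.add st.1 x, st.2 ++ [x]))
    (PySem.Set.empty, [])).2

-- A's first loop body: mapping[img_id].append(cat) on a defaultdict(list)
def pvStepA (m : PySem.Dict Int (List Int)) (ann : List (String × Int)) : PySem.Dict Int (List Int) :=
  match pvGetPair ann with
  | some (i, c) => m.modify i [] (fun v => v ++ [c])
  | none => m

def build_image_id_to_catids (annotations : List (List (String × Int))) : List (Int × List Int) :=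
  let mapping := annotations.foldl pvStepA PySem.Dict.empty
  (mapping.items.foldl (fun m kv => m.insert kv.1 (pvDedupLoop kv.2)) mapping).items

-- ===== PORT B =====
-- B's loop body: append cat only when it is not yet in seen[img_id]
def pvStepB (st : PySem.Dict Int (List Int) × PySem.Dict Int (PySem.Set Int))
    (ann : List (String × Int)) : PySem.Dict Int (List Int) × PySem.Dict Int (PySem.Set Int) :=
  match pvGetPair ann with
  | some (i, c) =>
      if (st.2.getD i PySem.Set.empty).contains c then st
      else (st.1.modify i [] (fun v => v ++ [c]),
            st.2.modify i PySem.Set.empty (fun s => PySem.Set.add s c))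
  | none => st

def build_image_id_to_catids_alt (annotations : List (List (String × Int))) : List (Int × List Int) :=
  (annotations.foldl pvStepB (PySem.Dict.empty, PySem.Dict.empty)).1.items

-- ===== PRECONDITION & SPEC =====
def Spec_build_image_id_to_catids (annotations : List (List (String × Int))) (out : List (Int × List Int)) : Prop := out = build_image_id_to_catids_alt annotations
instance (annotations : List (List (String × Int))) (out : List (Int × List Int)) : Decidable (Spec_build_image_id_to_catids annotations out) := by unfold Spec_build_image_id_to_catids; infer_instance

-- ===== CLAIM (what is proved, stated in full; the proofs are below) =====
def Claim_equal_build_image_id_to_catids : Prop := ∀ (annotations : List (List (String × Int))), Dom_build_image_id_to_catids annotations → Spec_build_image_id_to_catids annotations (build_image_id_to_catids annotations)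

-- ===== LEMMAS AND PROOFS =====

-- entrywise dedup of a mapping entry
def pvDD (kv : Int × List Int) : Int × List Int := (kv.1, PySem.List.dedup kv.2)

-- invariant tying B's streaming state (res, seen) to A's raw grouping state m
def pvInv (m res : PySem.Dict Int (List Int)) (seen : PySem.Dict Int (PySem.Set Int)) : Prop :=
  res.items = m.items.map pvDD
  ∧ (∀ k, seen.getD k PySem.Set.empty = PySem.Set.ofList (m.getD k []))
  ∧ (m.items.map Prod.fst).Nodup

lemma pvOfList_append_singleton (v : List Int) (c : Int) :
    PySem.Set.ofList (v ++ [c]) = PySem.Set.add (PySem.Set.ofList v) c := by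
  simp [PySem.Set.ofList, List.foldl_append]

lemma pvDedupLoop_eq (v : List Int) : pvDedupLoop v = PySem.List.dedup v := by
  have h : ∀ (w : List Int) (s : PySem.Set Int),
      (w.foldl (fun (st : PySem.Set Int × List Int) x =>
        if st.1.contains x then st else (PySem.Set.add st.1 x, st.2 ++ [x])) (s, (s : List Int)))
      = (w.foldl PySem.Set.add s, w.foldl PySem.Set.add s) := by
    intro w
    induction w with
    | nil => intro s; rfl
    | cons x t ih =>
      intro s
      by_cases hx : x ∈ s
      · simpa [List.foldl_cons, hx, PySem.Set.add_of_mem hx] using ih s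
      · have h2 := ih (PySem.Set.add s x)
        rw [PySem.Set.add_of_not_mem hx] at h2
        simpa [List.foldl_cons, hx, PySem.Set.add_of_not_mem hx] using h2
  have h0 := congrArg Prod.snd (h v [])
  simpa [pvDedupLoop, PySem.List.dedup, PySem.Set.ofList, PySem.Set.empty] using h0

-- find? on a pvDD-mapped items list
lemma pvFind?_map_pvDD (l : List (Int × List Int)) (i : Int) :
    (l.map pvDD).find? (fun p => p.1 == i) = (l.find? (fun p => p.1 == i)).map pvDD := by
  induction l with
  | nil => rfl
  | cons p t ih =>
    by_cases hp : p.1 = i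
    · rw [List.map_cons, List.find?_cons_of_pos (by simpa [pvDD] using hp),
        List.find?_cons_of_pos (by simpa using hp)]
      rfl
    · rw [List.map_cons, List.find?_cons_of_neg (by simpa [pvDD] using hp),
        List.find?_cons_of_neg (by simpa using hp), ih]

lemma pvGet?_of_items_map {m res : PySem.Dict Int (List Int)}
    (h : res.items = m.items.map pvDD) (i : Int) :
    res.get? i = (m.get? i).map PySem.List.dedup := by
  unfold PySem.Dict.get?
  rw [h, pvFind?_map_pvDD]
  cases m.items.find? (fun p => p.1 == i) <;> rfl

lemma pvContains_of_items_map {m res : PySem.Dict Int (List Int)}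
    (h : res.items = m.items.map pvDD) (i : Int) :
    res.contains i = m.contains i := by
  simp only [PySem.Dict.contains, h, List.any_map]
  rfl

-- with nodup keys, the entry found at a key is the only entry with that key
lemma pvEntry_unique (l : List (Int × List Int)) (hnd : (l.map Prod.fst).Nodup)
    {p : Int × List Int} (hp : p ∈ l) :
    l.find? (fun q => q.1 == p.1) = some p := by
  induction l with
  | nil => cases hp
  | cons q t ih =>
    rcases List.mem_cons.mp hp with hEq | hmem
    · subst hEq
      simp
    · have hq : (q.1 == p.1) = false := by
        refine beq_eq_false_iff_ne.mpr fun hEq => ?_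
        exact (List.nodup_cons.mp hnd).1 (hEq ▸ List.mem_map.mpr ⟨p, hmem, rfl⟩)
      simp only [List.find?_cons, hq]
      exact ih (List.nodup_cons.mp hnd).2 hmem

-- keys of an insert
lemma pvKeys_insert {ν : Type} (d : PySem.Dict Int ν) (k : Int) (w : ν) :
    (d.insert k w).items.map Prod.fst =
      if d.contains k then d.items.map Prod.fst else d.items.map Prod.fst ++ [k] := by
  unfold PySem.Dict.insert
  split_ifs with hc
  · show (d.items.map _).map _ = _
    rw [List.map_map]
    exact List.map_congr_left fun p _ => by
      by_cases hpk : p.1 = k <;> simp [Function.comp, hpk]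
  · show (d.items ++ _).map _ = _
    simp

lemma pvStep_inv (m res : PySem.Dict Int (List Int)) (seen : PySem.Dict Int (PySem.Set Int))
    (ann : List (String × Int)) (h : pvInv m res seen) :
    pvInv (pvStepA m ann) (pvStepB (res, seen) ann).1 (pvStepB (res, seen) ann).2 := by
  obtain ⟨h1, h2, h3⟩ := h
  cases hp : pvGetPair ann with
  | none => simp only [pvStepA, pvStepB, hp]; exact ⟨h1, h2, h3⟩
  | some ic =>
    obtain ⟨i, c⟩ := ic
    simp only [pvStepA, pvStepB, hp]
    have hseen : seen.getD i PySem.Set.empty = PySem.Set.ofList (m.getD i []) := h2 i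
    have hmodA : m.modify i [] (fun w => w ++ [c]) = m.insert i (m.getD i [] ++ [c]) := rfl
    by_cases hc : c ∈ m.getD i []
    · -- category already grouped for this image: B skips, A appends a duplicate
      have hcont : (seen.getD i PySem.Set.empty).contains c = true := by
        rw [hseen]
        simp [PySem.Set.contains, (PySem.Set.mem_ofList _ _).mpr hc]
      rw [hmodA]
      simp only [hcont, if_true]
      -- A's value at i is m.getD i [] (nonempty since c is in it), so the insert replaces in place
      obtain ⟨q, hfq⟩ : ∃ q, m.items.find? (fun p => p.1 == i) = some q := by
        rcases hf : m.items.find? (fun p => p.1 == i) with _ | q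
        · exfalso
          have : m.getD i [] = [] := by simp [PySem.Dict.getD, PySem.Dict.get?, hf]
          rw [this] at hc; cases hc
        · exact ⟨q, hf⟩
      have hq1 : (q.1 == i) = true := by simpa using List.find?_some hfq
      have hcontm : m.contains i = true := by
        show m.items.any _ = true
        exact List.any_eq_true.mpr ⟨q, List.mem_of_find?_eq_some hfq, hq1⟩
      have hdd : PySem.Set.ofList (m.getD i [] ++ [c]) = PySem.Set.ofList (m.getD i []) := by
        rw [pvOfList_append_singleton]
        exact PySem.Set.add_of_mem ((PySem.Set.mem_ofList _ _).mpr hc)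
      refine ⟨?_, ?_, ?_⟩
      · -- res unchanged still matches
        rw [h1]
        have : (m.insert i (m.getD i [] ++ [c])).items =
            m.items.map (fun p => if p.1 == i then (i, m.getD i [] ++ [c]) else p) := by
          simp [PySem.Dict.insert, hcontm]
        rw [this, List.map_map]
        refine List.map_congr_left fun p hmem => ?_
        by_cases hpi : p.1 = i
        · have hfind := pvEntry_unique m.items h3 hmem
          rw [hpi] at hfind
          have hpv : p.2 = m.getD i [] := by
            simp [PySem.Dict.getD, PySem.Dict.get?, hfind]
          simp [Function.comp, pvDD, PySem.List.dedup, hpi, hdd, hpv]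
        · simp [Function.comp, pvDD, hpi]
      · intro k
        by_cases hk : k = i
        · subst hk
          rw [PySem.Dict.getD_insert_self, pvOfList_append_singleton,
            PySem.Set.add_of_mem ((PySem.Set.mem_ofList _ _).mpr hc)]
          exact hseen
        · rw [PySem.Dict.getD_insert_of_ne m _ _ hk]; exact h2 k
      · rw [pvKeys_insert, if_pos hcontm]; exact h3
    · -- new category for this image: both sides append it
      have hcont : (seen.getD i PySem.Set.empty).contains c = false := by
        rw [hseen]
        simp only [PySem.Set.contains, List.contains_eq_any_beq, List.any_eq_false]
        intro y hy
        simp only [beq_iff_eq]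
        intro hEq
        subst hEq
        exact hc ((PySem.Set.mem_ofList _ _).mp hy)
      rw [hmodA]
      simp only [hcont, Bool.false_eq_true, if_false]
      have hmodR : res.modify i [] (fun w => w ++ [c]) = res.insert i (res.getD i [] ++ [c]) := rfl
      have hmodS : seen.modify i PySem.Set.empty (fun s => PySem.Set.add s c) =
          seen.insert i (PySem.Set.add (seen.getD i PySem.Set.empty) c) := rfl
      have hresD : res.getD i [] = PySem.List.dedup (m.getD i []) := by
        simp [PySem.Dict.getD, pvGet?_of_items_map h1 i]
        rcases m.get? i with _ | w <;> simp [PySem.List.dedup, PySem.Set.ofList, PySem.Set.empty]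
      have hcnm : c ∉ PySem.Set.ofList (m.getD i []) := fun hmem => hc ((PySem.Set.mem_ofList _ _).mp hmem)
      have hdd2 : PySem.Set.ofList (m.getD i [] ++ [c]) = PySem.Set.ofList (m.getD i []) ++ [c] := by
        rw [pvOfList_append_singleton]
        exact PySem.Set.add_of_not_mem hcnm
      have hcr : res.contains i = m.contains i := pvContains_of_items_map h1 i
      refine ⟨?_, ?_, ?_⟩
      · rw [hmodR, hresD]
        by_cases hcm : m.contains i = true
        · have hA : (m.insert i (m.getD i [] ++ [c])).items =
              m.items.map (fun p => if p.1 == i then (i, m.getD i [] ++ [c]) else p) := by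
            simp [PySem.Dict.insert, hcm]
          have hB : (res.insert i (PySem.List.dedup (m.getD i []) ++ [c])).items =
              res.items.map (fun p => if p.1 == i then (i, PySem.List.dedup (m.getD i []) ++ [c]) else p) := by
            simp [PySem.Dict.insert, hcr, hcm]
          rw [hA, hB, h1, List.map_map, List.map_map]
          refine List.map_congr_left fun p _ => ?_
          by_cases hpi : p.1 = i
          · simp [Function.comp, pvDD, PySem.List.dedup, hpi, hdd2]
          · simp [Function.comp, pvDD, hpi]
        · have hA : (m.insert i (m.getD i [] ++ [c])).items = m.items ++ [(i, m.getD i [] ++ [c])] := by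
            simp [PySem.Dict.insert, hcm]
          have hB : (res.insert i (PySem.List.dedup (m.getD i []) ++ [c])).items =
              res.items ++ [(i, PySem.List.dedup (m.getD i []) ++ [c])] := by
            simp [PySem.Dict.insert, hcr, hcm]
          rw [hA, hB, h1, List.map_append]
          simp [pvDD, PySem.List.dedup, hdd2]
      · intro k
        rw [hmodS]
        by_cases hk : k = i
        · subst hk
          rw [PySem.Dict.getD_insert_self, PySem.Dict.getD_insert_self, hseen,
            pvOfList_append_singleton]
        · rw [PySem.Dict.getD_insert_of_ne seen _ _ hk, PySem.Dict.getD_insert_of_ne m _ _ hk]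
          exact h2 k
      · rw [pvKeys_insert]
        by_cases hcm : m.contains i = true
        · rw [if_pos hcm]; exact h3
        · rw [if_neg hcm]
          have hnotin : i ∉ m.items.map Prod.fst := by
            intro hmem
            obtain ⟨p, hpm, hp1⟩ := List.mem_map.mp hmem
            have hany : m.items.any (fun q => q.1 == i) = true :=
              List.any_eq_true.mpr ⟨p, hpm, beq_iff_eq.mpr hp1⟩
            exact hcm hany
          refine List.Nodup.append h3 (List.nodup_singleton _) ?_
          intro a ha hb
          rw [List.mem_singleton] at hb
          exact hnotin (hb ▸ ha)

lemma pvFold_inv : ∀ (anns : List (List (String × Int))) (m res : PySem.Dict Int (List Int))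
    (seen : PySem.Dict Int (PySem.Set Int)), pvInv m res seen →
    pvInv (anns.foldl pvStepA m) (anns.foldl pvStepB (res, seen)).1 (anns.foldl pvStepB (res, seen)).2 := by
  intro anns
  induction anns with
  | nil => intro m res seen h; exact h
  | cons a t ih =>
    intro m res seen h
    have hstep := pvStep_inv m res seen a h
    have := ih (pvStepA m a) (pvStepB (res, seen) a).1 (pvStepB (res, seen) a).2 hstep
    simpa using this

lemma pvPhase2 (g : Int × List Int → List Int) :
    ∀ (post : List (Int × List Int)) (d : PySem.Dict Int (List Int)) (pre : List (Int × List Int)),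
    d.items = pre ++ post → (d.items.map Prod.fst).Nodup →
    (post.foldl (fun m kv => m.insert kv.1 (g kv)) d).items = pre ++ post.map (fun kv => (kv.1, g kv)) := by
  intro post
  induction post with
  | nil => intro d pre hit _; simpa using hit
  | cons kv rest ih =>
    intro d pre hit hnd
    have hmem : kv ∈ d.items := by rw [hit]; exact List.mem_append_right _ (List.mem_cons_self ..)
    have hcont : d.contains kv.1 = true :=
      List.any_eq_true.mpr ⟨kv, hmem, by simp⟩
    have hnd' : ((pre ++ kv :: rest).map Prod.fst).Nodup := hit ▸ hnd
    rw [List.map_append, List.map_cons] at hnd'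
    have hitems1 : (d.insert kv.1 (g kv)).items = (pre ++ [(kv.1, g kv)]) ++ rest := by
      have : (d.insert kv.1 (g kv)).items =
          d.items.map (fun p => if p.1 == kv.1 then (kv.1, g kv) else p) := by
        simp [PySem.Dict.insert, hcont]
      rw [this, hit, List.map_append, List.map_cons]
      have h0pre : ∀ p ∈ pre, (fun (p : Int × List Int) =>
          if p.1 == kv.1 then (kv.1, g kv) else p) p = id p := by
        intro p hpm
        have hb : ¬ (p.1 == kv.1) = true := by
          simp only [beq_iff_eq]
          intro hEq
          exact (List.disjoint_of_nodup_append hnd')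
            (hEq ▸ List.mem_map.mpr ⟨p, hpm, rfl⟩) (List.mem_cons_self ..)
        simp [hb]
      have h0rest : ∀ p ∈ rest, (fun (p : Int × List Int) =>
          if p.1 == kv.1 then (kv.1, g kv) else p) p = id p := by
        intro p hpm
        have hb : ¬ (p.1 == kv.1) = true := by
          simp only [beq_iff_eq]
          intro hEq
          exact (List.nodup_cons.mp (List.nodup_append.mp hnd').2.1).1
            (hEq ▸ List.mem_map.mpr ⟨p, hpm, rfl⟩)
        simp [hb]
      rw [List.map_congr_left h0pre, List.map_congr_left h0rest, List.map_id, List.map_id]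
      simp
    have hkeys1 : ((d.insert kv.1 (g kv)).items.map Prod.fst).Nodup := by
      rw [hitems1]
      simpa using hnd' 
    rw [List.foldl_cons]
    have := ih (d.insert kv.1 (g kv)) (pre ++ [(kv.1, g kv)]) (by simpa using hitems1) hkeys1
    simpa using this

-- ===== VERDICT (by name: the statement is the Claim_ definition above) =====
theorem build_image_id_to_catids_spec : Claim_equal_build_image_id_to_catids := by
  intro anns _
  unfold Spec_build_image_id_to_catids build_image_id_to_catids build_image_id_to_catids_alt
  have hinv : pvInv PySem.Dict.empty PySem.Dict.empty PySem.Dict.empty :=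
    ⟨rfl, fun k => rfl, by simp [PySem.Dict.empty]⟩
  obtain ⟨h1, _, h3⟩ := pvFold_inv anns PySem.Dict.empty PySem.Dict.empty PySem.Dict.empty hinv
  have hph := pvPhase2 (fun kv => pvDedupLoop kv.2)
    (anns.foldl pvStepA PySem.Dict.empty).items (anns.foldl pvStepA PySem.Dict.empty) [] rfl h3
  simp only [List.nil_append] at hph
  rw [hph, h1]
  exact (List.map_congr_left (fun kv _ => by simp [pvDD, pvDedupLoop_eq])).symm
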